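-- pv_equiv track=rewrite | github.com/alon-nagar/Gorilla-WAF-Project-2023 | scan_software/hpp.py | is_request_hpp
-- ===== SOURCE A (Python) =====
-- def is_request_hpp(request_data, url):
--     """
--         Function that checks if a request contains HTTP Parameter Pollution (HPP).
--           First, it checks for HPP in the parameters when entered in the URL directly.
--           Then, it checks for HPP in the parameters when entered in a input field.
--
--         Args:
--             request_data (str): A JSON string of the request data.
--             args (ImmutableMultiDict): The query parameters to check.
--
--         Returns:
--             tuple(bool, str): A tuple of (True/False - HPP detected, str - The string where HPP was detected).
--
--     """
--
--     # Send the request URL to the function that checks it.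
--     is_url_safe = is_url_hpp(url)
--
--     # Check if the URL is safe.
--     if is_url_safe != (False, None):
--         return is_url_safe
--
--     # Check if the request data contains HPP.
--     for param_name, param_value in request_data.items():
--         # Send the request data to the function that checks it.
--         if is_text_hpp(param_value, request_data) != (False, None):
--             return (True, param_name)
--
--     return (False, None)
--
-- def is_text_hpp(text, args):
--     """
--         Function to check if a string contains HTTP Parameter Pollution (HPP) queries.
--
--         Args:
--             text (str): The string to check if contains HPP queries.
--             args (ImmutableMultiDict): The query parameters to check.
--         Returns:
--             tuple(bool, str): A tuple of (True/False - HPP detected, str - The string where HPP was detected).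
--     """
--     # Loop through all the keys and values in the query parameters.
--     for key, value in args.items():
--         # Check if the parameter key is present in the text.
--         if ("&" + key + "=") in text:
--             # Return a tuple indicating that HPP was detected and the parameter name with HPP.
--             return (True, f"{text}")
--
--     return (False, None)
--
-- def is_url_hpp(url):
--     """
--     Check if the given URL contains HTTP Parameter Pollution (HPP) queries.
--
--     Args:
--         url (str): The URL to check.
--
--     Returns:
--         tuple: A tuple of (bool - True if HPP detected, str - The parameter name with HPP, or None if not detected).
--     """
--
--     # Split the URL into two parts: the part before the query string and the part after.
--     url_parts = url.split("?")
--
--     # If the URL has no query string, return False and None.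
--     if len(url_parts) < 2:
--         return (False, None)
--
--     # Split the query string into individual parameters.
--     query_string = url_parts[1]
--     params = query_string.split("&")
--
--     # Create an empty dictionary to hold the parameters.
--     param_dict = {}
--     hpp_param = None
--
--     for p in params:
--
--         # If the parameter doesn't contain an equals sign, skip it meaning that it can't be a parameter.
--         if "=" not in p:
--             continue
--
--         # Split the parameter into its name and value.
--         name, value = p.split("=")
--
--         # If the parameter is already in the dictionary, append the value to its list.
--         # Otherwise, add the parameter and its value to the dictionary.
--         if name in param_dict:
--             param_dict[name].append(value)
--         else:
--             param_dict[name] = [value]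
--
--         # If the parameter appears more than once or contains the string "%2C",
--         # it may indicate HPP, so set the HPP parameter to the current name and break the loop.
--         if len(param_dict[name]) > 1 or any("%2C" in v for v in param_dict[name]):
--             hpp_param = name
--             break
--
--     # Return True and the name of the HPP parameter if one was found, or False and None otherwise.
--     return (True if hpp_param else False, hpp_param)
-- ===== SOURCE B (Python) =====
-- def is_request_hpp(request_data, url):
--     # URL query: parse all well-formed name=value pieces up front, then pick the
--     # first one whose value carries an encoded comma or whose name already
--     # appeared among the earlier names.
--     parts = url.split("?")
--     if len(parts) >= 2:
--         fields = [p.split("=") for p in parts[1].split("&")]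
--         pairs = [(f[0], f[1]) for f in fields if len(f) == 2]
--         names = [n for n, _ in pairs]
--         bad = [n for k, (n, v) in enumerate(pairs) if "%2C" in v or n in names[:k]]
--         if bad:
--             return (True, bad[0])
--     # Request body: instead of scanning each value for every '&key=' needle,
--     # extract each value's candidate substrings lying between a '&' and a '='
--     # and look them up in the key set.
--     keys = set(request_data)
--     for param_name, value in request_data.items():
--         amps = [i for i, c in enumerate(value) if c == "&"]
--         eqs = [j for j, c in enumerate(value) if c == "="]
--         if any(value[i + 1:j] in keys for i in amps for j in eqs if i < j):
--             return (True, param_name)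
--     return (False, None)
-- ===== Notes on version B (the rewrite author's own statement) =====
-- stated objective: faster
-- what changed: B parses the whole query into pairs up front and selects the first polluted pair declaratively (prefix-membership comprehension) instead of A's stateful dict-of-value-lists loop with break, and the body check extracts each value's '&...=' candidate substrings and looks them up in a key set, removing the scan of every value for every key's needle; …
-- outside the precondition, e.g. on is_request_hpp({}, '?a=1&a=2&b=c=d'): A returns (True, 'a'), B returns (True, 'a'); on is_request_hpp({}, 'x?=1&=2'): A returns (False, ''), B returns (True, '')
import Mathlib
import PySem

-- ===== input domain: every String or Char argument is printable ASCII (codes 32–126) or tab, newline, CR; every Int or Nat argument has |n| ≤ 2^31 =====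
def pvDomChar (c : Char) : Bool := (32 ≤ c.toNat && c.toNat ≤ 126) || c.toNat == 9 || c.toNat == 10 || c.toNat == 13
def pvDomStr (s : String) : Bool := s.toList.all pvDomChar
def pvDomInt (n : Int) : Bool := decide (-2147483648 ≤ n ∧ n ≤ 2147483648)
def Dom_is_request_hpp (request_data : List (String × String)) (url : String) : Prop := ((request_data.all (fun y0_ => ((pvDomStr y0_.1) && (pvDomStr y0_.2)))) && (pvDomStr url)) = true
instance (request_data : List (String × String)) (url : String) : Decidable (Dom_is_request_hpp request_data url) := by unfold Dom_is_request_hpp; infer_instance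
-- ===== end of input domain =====

-- B parses the whole query up front and picks the first polluted pair declaratively, and the body
-- scan looks each value's '&…=' candidate substrings up in a key set instead of scanning every
-- value for every key's needle, so its body cost no longer grows with the number of keys
-- (objective: faster; a timing run measured B faster at the largest sizes).

-- s.split(sep): both programs only split on the nonempty literal separators "?" "&" "=",
-- where PySem.Str.split? is always some (exact there).
def pvSplit (s sep : String) : List String := (PySem.Str.split? s sep).getD []

-- ===== PORT A =====
-- is_url_hpp's parameter loop: param_dict of value lists, hpp_param set on the first trigger.
-- 'name, value = p.split("=")' raises in Python when the piece has ≥ 2 '='; the '| _' branch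
-- (reached only outside Pre_) skips such pieces, like the '"=" not in p' continue does.
def pvUrlLoopA : List String → PySem.Dict String (List String) → Option String
  | [], _ => none
  | p :: rest, d =>
    match pvSplit p "=" with
    | [name, value] =>
      let d' := if d.contains name
                then d.modify name [] (fun l => l ++ [value])
                else d.insert name [value]
      let cur := d'.getD name []
      if 1 < cur.length || cur.any (fun v => PySem.Str.isIn "%2C" v) then some name
      else pvUrlLoopA rest d'
    | _ => pvUrlLoopA rest d

-- is_url_hpp; 'True if hpp_param else False' is true iff hpp_param is a nonempty string.
def pvIsUrlHpp (url : String) : Bool × Option String :=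
  let parts := pvSplit url "?"
  if parts.length < 2 then (false, none)
  else
    match pvUrlLoopA (pvSplit (parts.getD 1 "") "&") PySem.Dict.empty with
    | some n => (n != "", some n)
    | none => (false, none)

-- is_text_hpp's loop over args.items()
def pvTextLoopA (text : String) : List (String × String) → Bool × Option String
  | [] => (false, none)
  | (key, _) :: rest =>
    if PySem.Str.isIn ("&" ++ key ++ "=") text then (true, some text)
    else pvTextLoopA text rest

-- is_request_hpp's loop over request_data.items()
def pvBodyLoopA (rd : List (String × String)) : List (String × String) → Bool × Option String
  | [] => (false, none)
  | (pn, pv) :: rest =>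
    if pvTextLoopA pv rd ≠ (false, none) then (true, some pn) else pvBodyLoopA rd rest

def is_request_hpp (request_data : List (String × String)) (url : String) : Bool × Option String :=
  let u := pvIsUrlHpp url
  if u ≠ (false, none) then u
  else pvBodyLoopA request_data request_data

-- ===== PORT B =====
-- pairs = [(f[0], f[1]) for f in fields if len(f) == 2]  over fields = [p.split("=") for p in pieces]
def pvPairsB (q : String) : List (String × String) :=
  (((pvSplit q "&").map (fun p => pvSplit p "=")).filter (fun f => f.length == 2)).map
    (fun f => (f.getD 0 "", f.getD 1 ""))

-- bad = [n for k, (n, v) in enumerate(pairs) if "%2C" in v or n in names[:k]]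
def pvBadB (pairs : List (String × String)) (names : List String) : List String :=
  (PySem.List.enumerate pairs).filterMap (fun kp =>
    if PySem.Str.isIn "%2C" kp.2.2 || (PySem.List.slice names none (some kp.1)).contains kp.2.1
    then some kp.2.1 else none)

-- amps/eqs index comprehensions and the any(...) over their pairs
def pvCandHit (keys : PySem.Set String) (v : String) : Bool :=
  let amps := (PySem.List.enumerate v.toList).filterMap
    (fun p => if p.2 == '&' then some p.1 else none)
  let eqs := (PySem.List.enumerate v.toList).filterMap
    (fun p => if p.2 == '=' then some p.1 else none)
  amps.any (fun i => eqs.any (fun j =>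
    decide (i < j) && PySem.Set.contains keys (PySem.Str.slice v (some (i + 1)) (some j))))

def pvBodyLoopB (keys : PySem.Set String) : List (String × String) → Bool × Option String
  | [] => (false, none)
  | (pn, pv) :: rest =>
    if pvCandHit keys pv then (true, some pn) else pvBodyLoopB keys rest

def is_request_hpp_alt (request_data : List (String × String)) (url : String) : Bool × Option String :=
  let parts := pvSplit url "?"
  let urlHit : Option String :=
    if 2 ≤ parts.length then
      let pairs := pvPairsB (parts.getD 1 "")
      (pvBadB pairs (pairs.map Prod.fst)).head?
    else none
  match urlHit with
  | some n => (true, some n)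
  | none => pvBodyLoopB (PySem.Set.ofList (request_data.map Prod.fst)) request_data

-- ===== PRECONDITION & SPEC =====
-- Pre_ excludes (a) request_data with duplicate keys — a Python dict cannot hold them, so any
-- assoc-list behaviour there is accidental; (b) URLs whose query contains a piece with two or
-- more '=' signs, on which A's 'name, value = p.split("=")' raises ValueError unless an earlier
-- piece already triggered; and (c) queries with an empty-named piece '=value' — whether that is
-- a parameter at all is anybody's call, and A's truthiness test on the name reports a duplicated
-- empty name as the un-flagged (False, '') while B flags it.
def Pre_is_request_hpp (request_data : List (String × String)) (url : String) : Prop :=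
  (request_data.map Prod.fst).Nodup ∧
  (2 ≤ (pvSplit url "?").length →
    ∀ p ∈ pvSplit ((pvSplit url "?").getD 1 "") "&",
      (pvSplit p "=").length ≤ 2 ∧
      ((pvSplit p "=").length = 2 → (pvSplit p "=").getD 0 "" ≠ ""))
instance (request_data : List (String × String)) (url : String) : Decidable (Pre_is_request_hpp request_data url) := by unfold Pre_is_request_hpp; infer_instance

def pvWitness_is_request_hpp : (List (String × String)) × String := ([("a", "1")], "x?a=1")

def Spec_is_request_hpp (request_data : List (String × String)) (url : String) (out : Bool × Option String) : Prop := out = is_request_hpp_alt request_data url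
instance (request_data : List (String × String)) (url : String) (out : Bool × Option String) : Decidable (Spec_is_request_hpp request_data url out) := by unfold Spec_is_request_hpp; infer_instance

-- ===== CLAIM (what is proved, stated in full; the proofs are below) =====
def Claim_equal_is_request_hpp : Prop := ∀ (request_data : List (String × String)) (url : String), Dom_is_request_hpp request_data url → Pre_is_request_hpp request_data url → Spec_is_request_hpp request_data url (is_request_hpp request_data url)

-- ===== LEMMAS AND PROOFS =====

-- proof-side spec of the URL scan: first pair whose value has "%2C" or whose name was seen
def pvFirstTrig : List (String × String) → List String → Option String
  | [], _ => none
  | (n, v) :: rest, acc =>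
    if PySem.Str.isIn "%2C" v || acc.contains n then some n
    else pvFirstTrig rest (acc ++ [n])

-- pvPairsB as a function of the piece list
def pvPairsOf (pieces : List String) : List (String × String) :=
  ((pieces.map (fun p => pvSplit p "=")).filter (fun f => f.length == 2)).map
    (fun f => (f.getD 0 "", f.getD 1 ""))

lemma pvPairsB_eq (q : String) : pvPairsB q = pvPairsOf (pvSplit q "&") := rfl

lemma pvPairsOf_cons (p : String) (rest : List String) :
    pvPairsOf (p :: rest) =
      if (pvSplit p "=").length = 2
      then ((pvSplit p "=").getD 0 "", (pvSplit p "=").getD 1 "") :: pvPairsOf rest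
      else pvPairsOf rest := by
  simp only [pvPairsOf, List.map_cons, List.filter_cons]
  by_cases h : (pvSplit p "=").length = 2
  · rw [if_pos (by simpa using h), if_pos h, List.map_cons]
  · rw [if_neg (by simpa using h), if_neg h]

-- A's dict loop equals the first-trigger spec over the parsed pairs
lemma urlLoopA_eq_firstTrig (pieces : List String) :
    ∀ (d : PySem.Dict String (List String)) (acc : List String),
      (∀ p ∈ pieces, (pvSplit p "=").length ≤ 2) →
      (∀ k, d.contains k = acc.contains k) →
      (∀ k l, d.get? k = some l → l ≠ []) →
      pvUrlLoopA pieces d = pvFirstTrig (pvPairsOf pieces) acc := by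
  induction pieces with
  | nil => intro d acc _ _ _; rfl
  | cons p rest ih =>
    intro d acc hpre hcont hne
    have hp : (pvSplit p "=").length ≤ 2 := hpre p (by simp)
    have hrest : ∀ q ∈ rest, (pvSplit q "=").length ≤ 2 :=
      fun q hq => hpre q (by simp [hq])
    rw [pvPairsOf_cons]
    match hsplit : pvSplit p "=" with
    | [] => simp only [pvUrlLoopA, hsplit]; rw [if_neg (by simp)]; exact ih d acc hrest hcont hne
    | [a] => simp only [pvUrlLoopA, hsplit]; rw [if_neg (by simp)]; exact ih d acc hrest hcont hne
    | a :: b :: c :: t => rw [hsplit] at hp; simp at hp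
    | [name, value] =>
      simp only [List.length_cons, List.length_nil]
      rw [if_pos (by norm_num), List.getD_cons_zero, List.getD_cons_succ, List.getD_cons_zero]
      simp only [pvUrlLoopA, hsplit]
      by_cases hc : d.contains name = true
      · -- duplicate name: both report it
        have hacc : acc.contains name = true := by rw [← hcont]; exact hc
        have hsome : (d.get? name).isSome := by
          rw [← PySem.Dict.contains_eq_isSome_get? d name]; exact hc
        obtain ⟨l, hl⟩ := Option.isSome_iff_exists.mp hsome
        have hlne := hne name l hl
        have hgd : (d.modify name [] (fun l => l ++ [value])).getD name [] = l ++ [value] := by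
          rw [PySem.Dict.getD_modify_self, PySem.Dict.getD_of_get?_eq_some d [] hl]
        simp only [hc, if_true, hgd]
        have hlen : 1 < (l ++ [value]).length := by
          cases l with | nil => exact absurd rfl hlne | cons x xs => simp
        simp only [hlen, decide_true, Bool.true_or, if_true, pvFirstTrig, hacc, Bool.or_true]
      · -- fresh name
        have hcf : d.contains name = false := by simpa using hc
        have hacc : acc.contains name = false := by rw [← hcont]; exact hcf
        simp only [hcf, Bool.false_eq_true, if_false, PySem.Dict.getD_insert_self]
        have hred : (decide (1 < ([value] : List String).length)
            || (([value] : List String).any fun v => PySem.Str.isIn "%2C" v))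
            = PySem.Str.isIn "%2C" value := by simp
        rw [hred]
        simp only [pvFirstTrig, hacc, Bool.or_false]
        cases hv : PySem.Str.isIn "%2C" value with
        | true => simp
        | false =>
          rw [if_neg (by simp), if_neg (by simp)]
          apply ih _ _ hrest
          · -- dict keys = accumulated names
            intro k
            rw [PySem.Dict.contains_insert d name k [value], hcont k, List.contains_append]
            cases h1 : acc.contains k <;> cases h2 : k == name <;>
              simp_all [BEq.comm]
            exact fun h => h2 h.symm
          · -- stored value lists stay nonempty
            intro k l hkl
            by_cases hk : k = name
            · subst hk
              rw [PySem.Dict.get?_insert_self] at hkl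
              cases hkl; simp
            · rw [PySem.Dict.get?_insert_of_ne d [value] hk] at hkl
              exact hne k l hkl

-- B's bad-comprehension head equals the first-trigger spec
lemma bad_head_eq_firstTrig (rest : List (String × String)) :
    ∀ (acc names : List String), names = acc ++ rest.map Prod.fst →
      ((PySem.List.enumerate rest ((acc.length : Nat) : Int)).filterMap (fun kp =>
        if PySem.Str.isIn "%2C" kp.2.2 ||
           (PySem.List.slice names none (some kp.1)).contains kp.2.1
        then some kp.2.1 else none)).head? = pvFirstTrig rest acc := by
  induction rest with
  | nil => intro acc names _; simp [pvFirstTrig, PySem.List.enumerate_nil]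
  | cons hd tl ih =>
    obtain ⟨n, v⟩ := hd
    intro acc names hnames
    rw [PySem.List.enumerate_cons]
    have hslice : PySem.List.slice names none (some ((acc.length : Nat) : Int)) = acc := by
      rw [PySem.List.slice_to_natCast, hnames]
      exact List.take_left
    simp only [List.filterMap_cons, hslice]
    by_cases hc : (PySem.Str.isIn "%2C" v || acc.contains n) = true
    · rw [if_pos hc, List.head?_cons]
      simp only [pvFirstTrig]
      rw [if_pos hc]
    · rw [if_neg hc]
      have hcast : ((acc.length : Nat) : Int) + 1 = (((acc ++ [n]).length : Nat) : Int) := by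
        simp only [List.length_append, List.length_singleton]; push_cast; omega
      rw [hcast]
      rw [ih (acc ++ [n]) names (by simp [hnames])]
      simp only [pvFirstTrig]
      rw [if_neg hc]

lemma firstTrig_mem (P : List (String × String)) :
    ∀ (acc : List String) (n : String), pvFirstTrig P acc = some n → n ∈ P.map Prod.fst := by
  induction P with
  | nil => intro acc n h; simp [pvFirstTrig] at h
  | cons hd tl ih =>
    obtain ⟨nm, v⟩ := hd
    intro acc n h
    simp only [pvFirstTrig] at h
    split at h
    · cases h; simp
    · exact List.mem_cons_of_mem _ (ih _ n h)

-- under Pre_'s query condition, parsed names are nonempty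
lemma pairsOf_names_ne (pieces : List String)
    (h : ∀ p ∈ pieces, (pvSplit p "=").length ≤ 2 ∧
          ((pvSplit p "=").length = 2 → (pvSplit p "=").getD 0 "" ≠ "")) :
    ∀ pr ∈ pvPairsOf pieces, pr.1 ≠ "" := by
  intro pr hpr
  simp only [pvPairsOf, List.mem_map, List.mem_filter, List.mem_map] at hpr
  obtain ⟨f, ⟨⟨p, hp, hf⟩, hlen⟩, hpr⟩ := hpr
  subst hf hpr
  exact (h p hp).2 (by simpa using hlen)

-- "&key=" occurs in v iff some '&' at a and '=' at b > a bracket exactly key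
lemma needle_iff_list (k v : List Char) :
    ('&' :: (k ++ ['='])) <:+: v ↔
      ∃ a b : Nat, a < b ∧ v[a]? = some '&' ∧ v[b]? = some '=' ∧
        (v.drop (a+1)).take (b - (a+1)) = k := by
  constructor
  · rintro ⟨s, t, h⟩
    rw [List.append_assoc] at h
    have hd0 : v.drop s.length = '&' :: (k ++ (['='] ++ t)) := by
      rw [← h, List.drop_left]; simp
    have hd1 : v.drop (s.length + 1) = k ++ (['='] ++ t) := by
      have := congrArg (List.drop 1) hd0
      rwa [List.drop_drop, List.drop_one, List.tail_cons] at this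
    have hd2 : v.drop (s.length + 1 + k.length) = '=' :: t := by
      have := congrArg (List.drop k.length) hd1
      rwa [List.drop_drop, List.drop_left] at this
    refine ⟨s.length, s.length + 1 + k.length, by omega, ?_, ?_, ?_⟩
    · have h0 : (v.drop s.length)[0]? = v[s.length + 0]? := List.getElem?_drop
      rw [hd0] at h0; simpa using h0.symm
    · have h0 : (v.drop (s.length + 1 + k.length))[0]? = v[s.length + 1 + k.length + 0]? :=
        List.getElem?_drop
      rw [hd2] at h0; simpa using h0.symm
    · rw [hd1]
      have : s.length + 1 + k.length - (s.length + 1) = k.length := by omega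
      rw [this, List.take_left]
  · rintro ⟨a, b, hab, ha, hb, hk⟩
    obtain ⟨hav, hae⟩ := List.getElem?_eq_some_iff.mp ha
    obtain ⟨hbv, hbe⟩ := List.getElem?_eq_some_iff.mp hb
    have hda : v.drop a = '&' :: v.drop (a + 1) := by
      rw [List.drop_eq_getElem_cons hav, hae]
    have hdb : v.drop b = '=' :: v.drop (b + 1) := by
      rw [List.drop_eq_getElem_cons hbv, hbe]
    have hsplit : v.drop (a+1) = k ++ v.drop b := by
      conv_lhs => rw [← List.take_append_drop (b - (a+1)) (v.drop (a+1))]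
      rw [hk, List.drop_drop]
      congr 2
      omega
    refine ⟨v.take a, v.drop (b+1), ?_⟩
    conv_rhs => rw [← List.take_append_drop a v]
    rw [hda, hsplit, hdb]
    simp

lemma toList_needle (k : String) : ("&" ++ k ++ "=").toList = '&' :: (k.toList ++ ['=']) := by
  rw [String.toList_append, String.toList_append]
  rfl

lemma slice_eq_iff (v : String) (a b : Nat) (k : String) :
    (PySem.Str.slice v (some ((a : Int) + 1)) (some (b : Int))) = k ↔
      (v.toList.drop (a+1)).take (b - (a+1)) = k.toList := by
  rw [← String.toList_inj]
  have ht : (PySem.Str.slice v (some ((a : Int) + 1)) (some (b : Int))).toList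
      = (v.toList.drop (a+1)).take (b - (a+1)) := by
    have h1 : (((a : Int) + 1)).toNat = a + 1 := by omega
    have h2 : ((b : Int)).toNat = b := by omega
    have h3 := PySem.List.slice_toNat (xs := v.toList)
      (a := (a : Int) + 1) (b := (b : Int)) (by omega) (by omega)
    simp only [pysem]
    rw [h3, h1, h2]
  rw [ht]

lemma mem_amps_iff (v : List Char) (c : Char) (i : Int) :
    (i ∈ (PySem.List.enumerate v).filterMap (fun p => if p.2 == c then some p.1 else none)) ↔
      ∃ a : Nat, v[a]? = some c ∧ i = (a : Int) := by
  rw [List.mem_filterMap]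
  constructor
  · rintro ⟨p, hp, hif⟩
    obtain ⟨kk, hkk, rfl⟩ := (PySem.List.mem_enumerate_iff _ _ _).mp hp
    by_cases hc : v[kk] = c
    · refine ⟨kk, by rw [List.getElem?_eq_getElem hkk, hc], ?_⟩
      simp only [beq_iff_eq, hc, if_pos] at hif
      cases hif; simp
    · simp only [beq_iff_eq] at hif
      rw [if_neg hc] at hif; cases hif
  · rintro ⟨a, ha, rfl⟩
    obtain ⟨hav, hae⟩ := List.getElem?_eq_some_iff.mp ha
    refine ⟨((a : Int), v[a]), (PySem.List.mem_enumerate_iff _ _ _).mpr ⟨a, hav, by simp⟩, ?_⟩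
    simp [hae]

-- A's is_text_hpp differs from (False, None) iff some key's needle occurs in the text
lemma pvTextLoopA_ne (text : String) (l : List (String × String)) :
    (pvTextLoopA text l ≠ (false, none)) ↔
      l.any (fun p => PySem.Str.isIn ("&" ++ p.1 ++ "=") text) = true := by
  induction l with
  | nil => simp [pvTextLoopA]
  | cons hd tl ih =>
    obtain ⟨kk, vv⟩ := hd
    simp only [pvTextLoopA, List.any_cons]
    cases h : PySem.Str.isIn ("&" ++ kk ++ "=") text with
    | true => simp
    | false => rw [Bool.false_or]; exact ih

-- B's candidate-extraction test equals A's needle scan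
lemma candHit_iff (rd : List (String × String)) (v : String) :
    pvCandHit (PySem.Set.ofList (rd.map Prod.fst)) v =
      rd.any (fun p => PySem.Str.isIn ("&" ++ p.1 ++ "=") v) := by
  rw [Bool.eq_iff_iff]
  simp only [pvCandHit, List.any_eq_true]
  constructor
  · rintro ⟨i, hi, j, hj, hcond⟩
    obtain ⟨a, ha, rfl⟩ := (mem_amps_iff _ _ _).mp hi
    obtain ⟨b, hb, rfl⟩ := (mem_amps_iff _ _ _).mp hj
    rw [Bool.and_eq_true, decide_eq_true_eq] at hcond
    obtain ⟨hab, hcontains⟩ := hcond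
    have hab' : a < b := by exact_mod_cast hab
    set s := PySem.Str.slice v (some ((a : Int) + 1)) (some (b : Int)) with hs
    have hmem : s ∈ rd.map Prod.fst := by
      rw [← PySem.Set.mem_ofList (rd.map Prod.fst) s]
      exact (PySem.Set.contains_iff _ _).mp hcontains
    obtain ⟨p, hp, hps⟩ := List.mem_map.mp hmem
    refine ⟨p, hp, ?_⟩
    rw [PySem.Str.isIn_iff_infix, toList_needle]
    rw [needle_iff_list]
    exact ⟨a, b, hab', ha, hb, (slice_eq_iff v a b p.1).mp ((hps.trans hs).symm)⟩
  · rintro ⟨p, hp, hneedle⟩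
    rw [PySem.Str.isIn_iff_infix, toList_needle, needle_iff_list] at hneedle
    obtain ⟨a, b, hab, ha, hb, hk⟩ := hneedle
    refine ⟨(a : Int), (mem_amps_iff _ _ _).mpr ⟨a, ha, rfl⟩,
            (b : Int), (mem_amps_iff _ _ _).mpr ⟨b, hb, rfl⟩, ?_⟩
    rw [Bool.and_eq_true, decide_eq_true_eq]
    refine ⟨by exact_mod_cast hab, ?_⟩
    rw [PySem.Set.contains_iff, PySem.Set.mem_ofList]
    have : PySem.Str.slice v (some ((a : Int) + 1)) (some (b : Int)) = p.1 :=
      (slice_eq_iff v a b p.1).mpr hk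
    rw [this]
    exact List.mem_map_of_mem hp

-- the two body scans agree
lemma pvBodyLoop_eq (rd : List (String × String)) (l : List (String × String)) :
    pvBodyLoopA rd l = pvBodyLoopB (PySem.Set.ofList (rd.map Prod.fst)) l := by
  induction l with
  | nil => simp [pvBodyLoopA, pvBodyLoopB]
  | cons hd tl ih =>
    obtain ⟨pn, pv⟩ := hd
    simp only [pvBodyLoopA, pvBodyLoopB, candHit_iff rd pv]
    by_cases h : pvTextLoopA pv rd ≠ (false, none)
    · rw [if_pos h, if_pos ((pvTextLoopA_ne pv rd).mp h)]
    · have hf : rd.any (fun p => PySem.Str.isIn ("&" ++ p.1 ++ "=") pv) = false := by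
        by_contra hcn
        exact h ((pvTextLoopA_ne pv rd).mpr (by simpa using hcn))
      rw [if_neg h, if_neg (by rw [hf]; simp), ih]

-- ===== VERDICT (by name: the statement is the Claim_ definition above) =====
theorem is_request_hpp_spec : Claim_equal_is_request_hpp := by
  intro rd url _hdom hpre
  obtain ⟨_hnodup, hq⟩ := hpre
  show is_request_hpp rd url = is_request_hpp_alt rd url
  simp only [is_request_hpp, is_request_hpp_alt, pvIsUrlHpp]
  by_cases hlen : (pvSplit url "?").length < 2
  · rw [if_pos hlen, if_neg (show ¬ (2 ≤ (pvSplit url "?").length) by omega)]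
    exact pvBodyLoop_eq rd rd
  · have h2 : 2 ≤ (pvSplit url "?").length := by omega
    have hq2 := hq h2
    set pieces := pvSplit ((pvSplit url "?").getD 1 "") "&" with hpieces
    have hA : pvUrlLoopA pieces PySem.Dict.empty = pvFirstTrig (pvPairsOf pieces) [] :=
      urlLoopA_eq_firstTrig pieces PySem.Dict.empty []
        (fun p hp => (hq2 p hp).1)
        (fun k => rfl)
        (fun k l hkl => by rw [PySem.Dict.get?_empty] at hkl; cases hkl)
    have hB : (pvBadB (pvPairsB ((pvSplit url "?").getD 1 ""))
          ((pvPairsB ((pvSplit url "?").getD 1 "")).map Prod.fst)).head?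
        = pvFirstTrig (pvPairsOf pieces) [] := by
      rw [pvPairsB_eq]
      exact bad_head_eq_firstTrig (pvPairsOf pieces) [] ((pvPairsOf pieces).map Prod.fst)
        (by simp)
    rw [if_neg hlen, if_pos h2, hA, hB]
    cases hres : pvFirstTrig (pvPairsOf pieces) [] with
    | none => exact pvBodyLoop_eq rd rd
    | some n =>
      have hne : n ≠ "" := by
        have hmem := firstTrig_mem (pvPairsOf pieces) [] n hres
        obtain ⟨pr, hpr, hpr1⟩ := List.mem_map.mp hmem
        exact hpr1 ▸ pairsOf_names_ne pieces hq2 pr hpr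
      simp [hne]
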